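-- pv_equiv track=rewrite | github.com/sun-hainan/Python | 差异理论/lcs_algorithm.py | one_direction_diff
-- ===== SOURCE A (Python) =====
-- def lcs_length(text_a, text_b):
--     """
--     计算最长公共子序列的长度
--
--     参数:
--         text_a: 第一个文本序列
--         text_b: 第二个文本序列
--
--     返回:
--         LCS长度和回溯路径
--     """
--     n = len(text_a)
--     m = len(text_b)
--
--     # 创建DP表，dp[i][j]表示text_a[:i]和text_b[:j]的LCS长度
--     # 初始化为(n+1) x (m+1)的零矩阵
--     dp = [[0] * (m + 1) for _ in range(n + 1)]
--
--     # 填充DP表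
--     # 遍历text_a的每个位置
--     for i in range(1, n + 1):
--         # 遍历text_b的每个位置
--         for j in range(1, m + 1):
--             if text_a[i - 1] == text_b[j - 1]:
--                 # 字符匹配，LCS长度加1
--                 dp[i][j] = dp[i - 1][j - 1] + 1
--             else:
--                 # 字符不匹配，取两个方向的最大值
--                 dp[i][j] = max(dp[i - 1][j], dp[i][j - 1])
--
--     return dp[n][m], dp
--
-- def lcs_diff(text_a, text_b):
--     """
--     生成类似diff的LCS对比结果
--
--     返回每个字符的状态：'equal', 'delete', 'insert'
--
--     参数:
--         text_a: 原始文本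
--         text_b: 目标文本
--
--     返回:
--         对比结果列表
--     """
--     n = len(text_a)
--     m = len(text_b)
--
--     # 计算DP表
--     _, dp = lcs_length(text_a, text_b)
--
--     # 回溯生成diff
--     result = []
--     i = n
--     j = m
--
--     while i > 0 or j > 0:
--         if i > 0 and j > 0 and text_a[i - 1] == text_b[j - 1]:
--             # 字符相同
--             result.append(('equal', text_a[i - 1]))
--             i -= 1
--             j -= 1
--         elif j > 0 and (i == 0 or dp[i][j - 1] >= dp[i - 1][j]):
--             # text_b中的字符是新增的
--             result.append(('insert', text_b[j - 1]))
--             j -= 1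
--         else:
--             # text_a中的字符被删除
--             result.append(('delete', text_a[i - 1]))
--             i -= 1
--
--     result.reverse()
--     return result
--
-- def one_direction_diff(text_a, text_b):
--     """
--     简化的单向diff，用于显示从text_a到text_b的变化
--
--     参数:
--         text_a: 原始文本
--         text_b: 目标文本
--
--     返回:
--         差异列表
--     """
--     diff = lcs_diff(text_a, text_b)
--     result = []
--
--     for op, char in diff:
--         if op == 'equal':
--             result.append(f" {char}")
--         elif op == 'delete':
--             result.append(f"-{char}")
--         else:  # insert
--             result.append(f"+{char}")
--
--     return ''.join(result)
-- ===== SOURCE B (Python) =====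
-- def one_direction_diff(text_a, text_b):
--     # Rolling row-by-row DP build (no index mutation) + recursive forward emitter
--     # (no backtrack list + reverse).  Same tie-breaks as the classic version.
--     rows = [[0] * (len(text_b) + 1)]
--     for ca in text_a:
--         prev = rows[-1]
--         row = [0]
--         left = 0
--         for (diag, up), cb in zip(zip(prev, prev[1:]), text_b):
--             left = diag + 1 if ca == cb else max(up, left)
--             row.append(left)
--         rows.append(row)
--
--     def emit(i, j):
--         if i > 0 and j > 0 and text_a[i - 1] == text_b[j - 1]:
--             return emit(i - 1, j - 1) + ' ' + text_a[i - 1]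
--         if j > 0 and (i == 0 or rows[i][j - 1] >= rows[i - 1][j]):
--             return emit(i, j - 1) + '+' + text_b[j - 1]
--         if i > 0:
--             return emit(i - 1, j) + '-' + text_a[i - 1]
--         return ''
--
--     return emit(len(text_a), len(text_b))
-- ===== Notes on version B (the rewrite author's own statement) =====
-- stated objective: alternative
-- what changed: The DP table is built row-by-row by folding over the characters (appending rows, no index mutation) instead of in-place mutation over index ranges, and the diff string is produced by a top-down recursive emitter that appends after the recursive call, replacing the while-loop backtracking plus list reverse plus separate op-to-prefix mapping pass.
import Mathlib
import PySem

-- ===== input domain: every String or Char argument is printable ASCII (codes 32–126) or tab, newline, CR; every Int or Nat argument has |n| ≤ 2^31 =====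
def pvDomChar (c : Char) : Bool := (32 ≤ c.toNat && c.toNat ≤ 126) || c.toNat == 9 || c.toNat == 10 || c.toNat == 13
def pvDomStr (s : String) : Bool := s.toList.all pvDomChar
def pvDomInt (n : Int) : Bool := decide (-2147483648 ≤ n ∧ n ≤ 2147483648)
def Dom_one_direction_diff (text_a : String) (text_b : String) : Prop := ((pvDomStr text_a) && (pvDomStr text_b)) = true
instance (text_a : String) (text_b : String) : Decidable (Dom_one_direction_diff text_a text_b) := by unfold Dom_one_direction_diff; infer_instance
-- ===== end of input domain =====

-- B replaces the in-place index-mutating DP fill by a row-appending fold over the characters and the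
-- while-loop backtracking + reverse + op-mapping pass by a top-down recursive emitter (alternative decomposition, same cost).

-- ===== PORT A =====
-- helper lcs_length of A.  Loop indices i, j of the Python are ints ranging over range(1, n+1) /
-- range(1, m+1); all list indexings i-1, j-1, i, j are nonnegative and in range, so pyGetD/pySetD
-- with a default are exact here.
def lcs_length (text_a : String) (text_b : String) : Int × List (List Int) :=
  let aL := text_a.toList
  let bL := text_b.toList
  let n := aL.length
  let m := bL.length
  let dp0 : List (List Int) := List.replicate (n + 1) (List.replicate (m + 1) (0 : Int))
  let dp := (PySem.List.pyRange 1 ((n : Int) + 1) 1).foldl (fun dp i =>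
    (PySem.List.pyRange 1 ((m : Int) + 1) 1).foldl (fun dp j =>
      let v : Int :=
        if PySem.List.pyGetD aL (i - 1) ' ' = PySem.List.pyGetD bL (j - 1) ' ' then
          PySem.List.pyGetD (PySem.List.pyGetD dp (i - 1) []) (j - 1) 0 + 1
        else
          max (PySem.List.pyGetD (PySem.List.pyGetD dp (i - 1) []) j 0)
              (PySem.List.pyGetD (PySem.List.pyGetD dp i []) (j - 1) 0)
      PySem.List.pySetD dp i (PySem.List.pySetD (PySem.List.pyGetD dp i []) j v)) dp) dp0
  (PySem.List.pyGetD (PySem.List.pyGetD dp (n : Int) []) (m : Int) 0, dp)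

-- the while-loop of lcs_diff.  i, j are Python ints that start at the lengths and only decrease by 1
-- while positive, so they stay nonnegative and are modelled by Nat; every indexing text_a[i-1],
-- text_b[j-1], dp[i][j-1], dp[i-1][j] is performed (after Python's and/or short-circuiting) only with
-- the index nonnegative and in range, so getD is exact.
def lcsBtLoop (aL bL : List Char) (dp : List (List Int)) (i j : Nat)
    (acc : List (String × Char)) : List (String × Char) :=
  if h : 0 < i ∨ 0 < j then
    if h1 : 0 < i ∧ 0 < j ∧ aL.getD (i - 1) ' ' = bL.getD (j - 1) ' ' then
      lcsBtLoop aL bL dp (i - 1) (j - 1) (acc ++ [("equal", aL.getD (i - 1) ' ')])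
    else if h2 : 0 < j ∧ (i = 0 ∨ (dp.getD i []).getD (j - 1) 0 ≥ (dp.getD (i - 1) []).getD j 0) then
      lcsBtLoop aL bL dp i (j - 1) (acc ++ [("insert", bL.getD (j - 1) ' ')])
    else
      lcsBtLoop aL bL dp (i - 1) j (acc ++ [("delete", aL.getD (i - 1) ' ')])
  else acc
termination_by i + j
decreasing_by
  · omega
  · omega
  · rcases Nat.eq_zero_or_pos i with hi | hi
    · exact absurd ⟨by omega, Or.inl hi⟩ h2
    · omega

def lcs_diff (text_a : String) (text_b : String) : List (String × Char) :=
  let aL := text_a.toList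
  let bL := text_b.toList
  let n := aL.length
  let m := bL.length
  let dp := (lcs_length text_a text_b).2
  (lcsBtLoop aL bL dp n m []).reverse

-- the f-strings " {c}" / "-{c}" / "+{c}" are the two-character lists below; ''.join is Chars.join [].
def one_direction_diff (text_a : String) (text_b : String) : String :=
  let diff := lcs_diff text_a text_b
  let result : List (List Char) := diff.foldl (fun r t =>
    r ++ [if t.1 = "equal" then [' ', t.2] else if t.1 = "delete" then ['-', t.2] else ['+', t.2]]) []
  String.mk (PySem.Chars.join [] result)

-- ===== PORT B =====
-- inner fold of Source B: one new DP row from the previous row (prev[1:] is prev.tail), state (row, left)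
def altRowStep (bL : List Char) (ca : Char) (prev : List Int) : List Int :=
  (((prev.zip prev.tail).zip bL).foldl (fun (st : List Int × Int) x =>
      let left : Int := if ca = x.2 then x.1.1 + 1 else max x.1.2 st.2
      (st.1 ++ [left], left)) ([0], 0)).1

-- outer fold of Source B: rows[-1] is getLast (rows is never empty)
def altRows (aL bL : List Char) : List (List Int) :=
  aL.foldl (fun rows ca => rows ++ [altRowStep bL ca (rows.getLast?.getD [])])
    [List.replicate (bL.length + 1) (0 : Int)]

-- Source B's recursive emit; indices are nonnegative and (after short-circuiting) in range, so getD is exact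
def emitAux (aL bL : List Char) (rows : List (List Int)) (i j : Nat) : List Char :=
  if h1 : 0 < i ∧ 0 < j ∧ aL.getD (i - 1) ' ' = bL.getD (j - 1) ' ' then
    emitAux aL bL rows (i - 1) (j - 1) ++ [' ', aL.getD (i - 1) ' ']
  else if h2 : 0 < j ∧ (i = 0 ∨ (rows.getD i []).getD (j - 1) 0 ≥ (rows.getD (i - 1) []).getD j 0) then
    emitAux aL bL rows i (j - 1) ++ ['+', bL.getD (j - 1) ' ']
  else if 0 < i then
    emitAux aL bL rows (i - 1) j ++ ['-', aL.getD (i - 1) ' ']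
  else []
termination_by i + j
decreasing_by
  · omega
  · omega
  · omega

def one_direction_diff_alt (text_a : String) (text_b : String) : String :=
  let aL := text_a.toList
  let bL := text_b.toList
  String.mk (emitAux aL bL (altRows aL bL) aL.length bL.length)

-- ===== PRECONDITION & SPEC =====
def Spec_one_direction_diff (text_a : String) (text_b : String) (out : String) : Prop := out = one_direction_diff_alt text_a text_b
instance (text_a : String) (text_b : String) (out : String) : Decidable (Spec_one_direction_diff text_a text_b out) := by unfold Spec_one_direction_diff; infer_instance

-- ===== CLAIM (what is proved, stated in full; the proofs are below) =====
def Claim_equal_one_direction_diff : Prop := ∀ (text_a : String) (text_b : String), Dom_one_direction_diff text_a text_b → Spec_one_direction_diff text_a text_b (one_direction_diff text_a text_b)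

-- ===== LEMMAS AND PROOFS =====

-- the canonical LCS-length function both tables compute
def lcsL (aL bL : List Char) : Nat → Nat → Int
  | 0, _ => 0
  | _ + 1, 0 => 0
  | i + 1, j + 1 =>
    if aL.getD i ' ' = bL.getD j ' ' then lcsL aL bL i j + 1
    else max (lcsL aL bL i (j + 1)) (lcsL aL bL (i + 1) j)
termination_by i j => i + j

def rowT (aL bL : List Char) (i : Nat) : List Int :=
  (List.range (bL.length + 1)).map (lcsL aL bL i)

lemma lcsL_zero_right (aL bL : List Char) (i : Nat) : lcsL aL bL i 0 = 0 := by
  cases i <;> simp [lcsL]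

lemma lcsL_succ (aL bL : List Char) (i j : Nat) :
    lcsL aL bL (i + 1) (j + 1) =
      if aL.getD i ' ' = bL.getD j ' ' then lcsL aL bL i j + 1
      else max (lcsL aL bL i (j + 1)) (lcsL aL bL (i + 1) j) := by
  simp [lcsL]

lemma rowT_zero (aL bL : List Char) : rowT aL bL 0 = List.replicate (bL.length + 1) (0 : Int) := by
  unfold rowT
  rw [show (lcsL aL bL 0) = Function.const Nat (0 : Int) from funext fun j => by simp [lcsL],
    List.map_const, List.length_range]

lemma set_map_range {α : Type} (f : Nat → α) (N idx : Nat) (v : α) :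
    (List.map f (List.range N)).set idx v
      = (List.range N).map (fun t => if t = idx then v else f t) := by
  apply List.ext_getElem
  · simp
  · intro k h1 h2
    simp only [List.getElem_set, List.getElem_map, List.getElem_range]
    by_cases hk : idx = k <;> simp [hk]
    omega

-- ---- B side: the rolling rows equal the canonical table ----

lemma zip_rowT (f : Nat → Int) (bL : List Char) :
    ((List.map f (List.range (bL.length + 1))).zip
        (List.map f (List.range (bL.length + 1))).tail).zip bL
      = (List.range bL.length).map (fun j => ((f j, f (j + 1)), bL.getD j ' ')) := by
  apply List.ext_getElem
  · simp
  · intro k h1 h2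
    simp only [List.length_zip, List.length_map, List.length_tail, List.length_range] at h1
    have hk : k < bL.length := by omega
    simp only [List.getElem_zip, List.getElem_map, List.getElem_tail, List.getElem_range,
      List.getElem_map, List.getD_eq_getElem bL ' ' hk]

lemma rowfold (aL bL : List Char) (k : Nat) (ca : Char) (hca : ca = aL.getD k ' ') :
    ∀ m' : Nat, m' ≤ bL.length →
      (((List.range m').map (fun j => ((lcsL aL bL k j, lcsL aL bL k (j + 1)), bL.getD j ' '))).foldl
          (fun (st : List Int × Int) x =>
            let left : Int := if ca = x.2 then x.1.1 + 1 else max x.1.2 st.2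
            (st.1 ++ [left], left)) ([0], 0))
        = ((List.range (m' + 1)).map (lcsL aL bL (k + 1)), lcsL aL bL (k + 1) m') := by
  intro m' hm'
  induction m' with
  | zero => simp [List.range_one, lcsL_zero_right]
  | succ m'' ih =>
    rw [List.range_succ, List.map_append, List.foldl_append, ih (by omega)]
    simp only [List.map_cons, List.map_nil, List.foldl_cons, List.foldl_nil]
    have hstep : (if ca = bL.getD m'' ' ' then lcsL aL bL k m'' + 1
        else max (lcsL aL bL k (m'' + 1)) (lcsL aL bL (k + 1) m''))
        = lcsL aL bL (k + 1) (m'' + 1) := by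
      rw [lcsL_succ, hca]
    rw [hstep]
    rw [show List.range (m'' + 1 + 1) = List.range (m'' + 1) ++ [m'' + 1] from List.range_succ]
    simp

lemma altRowStep_rowT (aL bL : List Char) (k : Nat) :
    altRowStep bL (aL.getD k ' ') (rowT aL bL k) = rowT aL bL (k + 1) := by
  unfold altRowStep rowT
  rw [zip_rowT (lcsL aL bL k) bL,
    rowfold aL bL k (aL.getD k ' ') rfl bL.length le_rfl]

lemma altRows_go (aL bL : List Char) :
    ∀ (l₂ l₁ : List Char), aL = l₁ ++ l₂ →
      l₂.foldl (fun rows ca => rows ++ [altRowStep bL ca (rows.getLast?.getD [])])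
          ((List.range (l₁.length + 1)).map (rowT aL bL))
        = (List.range (aL.length + 1)).map (rowT aL bL) := by
  intro l₂
  induction l₂ with
  | nil =>
    intro l₁ h
    simp [h]
  | cons ca l₂ ih =>
    intro l₁ h
    rw [List.foldl_cons]
    have hlast : (((List.range (l₁.length + 1)).map (rowT aL bL)).getLast?.getD [])
        = rowT aL bL l₁.length := by
      rw [List.range_succ, List.map_append]
      simp
    have hca : ca = aL.getD l₁.length ' ' := by
      rw [h, List.getD_eq_getElem _ _ (by simp),
        List.getElem_append_right (le_refl l₁.length)]
      simp
    rw [hlast, hca, altRowStep_rowT aL bL l₁.length]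
    have : (List.range (l₁.length + 1)).map (rowT aL bL) ++ [rowT aL bL (l₁.length + 1)]
        = (List.range ((l₁ ++ [ca]).length + 1)).map (rowT aL bL) := by
      simp [List.range_succ]
    rw [this, ih (l₁ ++ [ca]) (by simp [h])]

lemma altRows_eq_tableT (aL bL : List Char) :
    altRows aL bL = (List.range (aL.length + 1)).map (rowT aL bL) := by
  unfold altRows
  have : [List.replicate (bL.length + 1) (0 : Int)]
      = (List.range (0 + 1)).map (rowT aL bL) := by
    simp [List.range_one, rowT_zero]
  rw [this]
  exact altRows_go aL bL aL [] rfl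

-- ---- A side: the mutated table equals the canonical table ----

def pRow (aL bL : List Char) (i j' : Nat) : List Int :=
  (List.range (bL.length + 1)).map (fun j => if j ≤ j' then lcsL aL bL i j else 0)

def midT (aL bL : List Char) (i j' : Nat) : List (List Int) :=
  (List.range (aL.length + 1)).map (fun t =>
    if t < i then rowT aL bL t
    else if t = i then pRow aL bL i j'
    else List.replicate (bL.length + 1) (0 : Int))

def oT (aL bL : List Char) (k : Nat) : List (List Int) :=
  (List.range (aL.length + 1)).map (fun t =>
    if t ≤ k then rowT aL bL t else List.replicate (bL.length + 1) (0 : Int))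

lemma pRow_zero (aL bL : List Char) (i : Nat) :
    pRow aL bL i 0 = List.replicate (bL.length + 1) (0 : Int) := by
  unfold pRow
  rw [show (fun j => if j ≤ 0 then lcsL aL bL i j else (0 : Int)) = Function.const Nat (0 : Int)
    from funext fun j => by cases j <;> simp [lcsL_zero_right], List.map_const, List.length_range]

lemma pRow_full (aL bL : List Char) (i : Nat) : pRow aL bL i bL.length = rowT aL bL i := by
  unfold pRow rowT
  apply List.map_congr_left
  intro j hj
  simp only [List.mem_range] at hj
  simp [Nat.lt_succ_iff.mp hj]

lemma midT_zero (aL bL : List Char) (k : Nat) : midT aL bL (k + 1) 0 = oT aL bL k := by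
  unfold midT oT
  apply List.map_congr_left
  intro t _
  rcases Nat.lt_trichotomy t (k + 1) with h | h | h
  · simp [h, Nat.lt_succ_iff.mp h]
  · simp [h, pRow_zero]
  · rw [if_neg (by omega), if_neg (by omega), if_neg (by omega)]

lemma midT_full (aL bL : List Char) (k : Nat) :
    midT aL bL (k + 1) bL.length = oT aL bL (k + 1) := by
  unfold midT oT
  apply List.map_congr_left
  intro t _
  rcases Nat.lt_trichotomy t (k + 1) with h | h | h
  · simp [h, Nat.le_of_lt h]
  · simp [h, pRow_full]
  · rw [if_neg (by omega), if_neg (by omega), if_neg (by omega)]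

def pieceOf (t : String × Char) : List Char :=
  if t.1 = "equal" then [' ', t.2] else if t.1 = "delete" then ['-', t.2] else ['+', t.2]

lemma oT_zero (aL bL : List Char) :
    oT aL bL 0 = List.replicate (aL.length + 1) (List.replicate (bL.length + 1) (0 : Int)) := by
  unfold oT
  rw [show (fun t => if t ≤ 0 then rowT aL bL t else List.replicate (bL.length + 1) (0 : Int))
      = Function.const Nat (List.replicate (bL.length + 1) (0 : Int)) from
    funext fun t => by cases t <;> simp [rowT_zero], List.map_const, List.length_range]

lemma innerBody (aL bL : List Char) (k j'' : Nat) (hk : k < aL.length) (hj : j'' < bL.length) :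
    ((fun dp (j : Int) =>
        let v : Int :=
          if PySem.List.pyGetD aL ((1 + (k : Int)) - 1) ' ' = PySem.List.pyGetD bL (j - 1) ' ' then
            PySem.List.pyGetD (PySem.List.pyGetD dp ((1 + (k : Int)) - 1) []) (j - 1) 0 + 1
          else
            max (PySem.List.pyGetD (PySem.List.pyGetD dp ((1 + (k : Int)) - 1) []) j 0)
                (PySem.List.pyGetD (PySem.List.pyGetD dp (1 + (k : Int)) []) (j - 1) 0)
        PySem.List.pySetD dp (1 + (k : Int))
          (PySem.List.pySetD (PySem.List.pyGetD dp (1 + (k : Int)) []) j v))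
      (midT aL bL (k + 1) j'') (1 + (j'' : Int)))
      = midT aL bL (k + 1) (j'' + 1) := by
  have e3 : (1 + (j'' : Int)) = (((j'' + 1 : Nat)) : Int) := by push_cast; ring
  have e4 : (1 + (k : Int)) = (((k + 1 : Nat)) : Int) := by push_cast; ring
  have hrowk : (midT aL bL (k + 1) j'').getD k [] = rowT aL bL k := by
    unfold midT
    rw [PySem.List.getD_map_range _ _ _ _ (by omega)]
    simp
  have hrowk1 : (midT aL bL (k + 1) j'').getD (k + 1) [] = pRow aL bL (k + 1) j'' := by
    unfold midT
    rw [PySem.List.getD_map_range _ _ _ _ (by omega)]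
    simp
  have hr1 : (rowT aL bL k).getD j'' 0 = lcsL aL bL k j'' := by
    unfold rowT; rw [PySem.List.getD_map_range _ _ _ _ (by omega)]
  have hr2 : (rowT aL bL k).getD (j'' + 1) 0 = lcsL aL bL k (j'' + 1) := by
    unfold rowT; rw [PySem.List.getD_map_range _ _ _ _ (by omega)]
  have hr3 : (pRow aL bL (k + 1) j'').getD j'' 0 = lcsL aL bL (k + 1) j'' := by
    unfold pRow; rw [PySem.List.getD_map_range _ _ _ _ (by omega)]; simp
  have e5 : (((k + 1 : Nat)) : Int) - 1 = ((k : Nat) : Int) := by push_cast; ring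
  have e6 : (((j'' + 1 : Nat)) : Int) - 1 = ((j'' : Nat) : Int) := by push_cast; ring
  simp only [e3, e4]
  simp only [e5, e6, PySem.List.pyGetD_natCast, PySem.List.pySetD_natCast,
    hrowk, hrowk1, hr1, hr2, hr3]
  have hv : (if aL.getD k ' ' = bL.getD j'' ' ' then lcsL aL bL k j'' + 1
      else max (lcsL aL bL k (j'' + 1)) (lcsL aL bL (k + 1) j''))
      = lcsL aL bL (k + 1) (j'' + 1) := (lcsL_succ aL bL k j'').symm
  rw [hv]
  have hsetrow : (pRow aL bL (k + 1) j'').set (j'' + 1) (lcsL aL bL (k + 1) (j'' + 1))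
      = pRow aL bL (k + 1) (j'' + 1) := by
    unfold pRow
    rw [set_map_range]
    apply List.map_congr_left
    intro j _
    split_ifs with c1 c2 c3 c4 <;> first | rfl | omega | (subst c1; rfl)
  rw [hsetrow]
  unfold midT
  rw [set_map_range]
  apply List.map_congr_left
  intro t _
  split_ifs <;> first | rfl | omega

lemma innerfold (aL bL : List Char) (k : Nat) (hk : k < aL.length) :
    ∀ j', j' ≤ bL.length →
      ((List.range j').map (fun (q : Nat) => (1 : Int) + (q : Int))).foldl
        (fun dp j =>
          let v : Int :=
            if PySem.List.pyGetD aL ((1 + (k : Int)) - 1) ' ' = PySem.List.pyGetD bL (j - 1) ' ' then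
              PySem.List.pyGetD (PySem.List.pyGetD dp ((1 + (k : Int)) - 1) []) (j - 1) 0 + 1
            else
              max (PySem.List.pyGetD (PySem.List.pyGetD dp ((1 + (k : Int)) - 1) []) j 0)
                  (PySem.List.pyGetD (PySem.List.pyGetD dp (1 + (k : Int)) []) (j - 1) 0)
          PySem.List.pySetD dp (1 + (k : Int))
            (PySem.List.pySetD (PySem.List.pyGetD dp (1 + (k : Int)) []) j v))
        (midT aL bL (k + 1) 0)
      = midT aL bL (k + 1) j' := by
  intro j' hj'
  induction j' with
  | zero => simp
  | succ j'' ih =>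
    rw [List.range_succ, List.map_append, List.foldl_append, ih (by omega)]
    simp only [List.map_cons, List.map_nil, List.foldl_cons, List.foldl_nil]
    exact innerBody aL bL k j'' hk (by omega)

lemma outerfold (aL bL : List Char) :
    ∀ k', k' ≤ aL.length →
      ((List.range k').map (fun (q : Nat) => (1 : Int) + (q : Int))).foldl
        (fun dp i =>
          ((List.range bL.length).map (fun (q : Nat) => (1 : Int) + (q : Int))).foldl
            (fun dp j =>
              let v : Int :=
                if PySem.List.pyGetD aL (i - 1) ' ' = PySem.List.pyGetD bL (j - 1) ' ' then
                  PySem.List.pyGetD (PySem.List.pyGetD dp (i - 1) []) (j - 1) 0 + 1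
                else
                  max (PySem.List.pyGetD (PySem.List.pyGetD dp (i - 1) []) j 0)
                      (PySem.List.pyGetD (PySem.List.pyGetD dp i []) (j - 1) 0)
              PySem.List.pySetD dp i
                (PySem.List.pySetD (PySem.List.pyGetD dp i []) j v)) dp)
        (oT aL bL 0)
      = oT aL bL k' := by
  intro k' hk'
  induction k' with
  | zero => simp
  | succ k ih =>
    rw [List.range_succ, List.map_append, List.foldl_append, ih (by omega)]
    simp only [List.map_cons, List.map_nil, List.foldl_cons, List.foldl_nil]
    rw [← midT_zero aL bL k, innerfold aL bL k (by omega) bL.length le_rfl,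
      midT_full aL bL k]

lemma oT_full (aL bL : List Char) :
    oT aL bL aL.length = (List.range (aL.length + 1)).map (rowT aL bL) := by
  unfold oT
  apply List.map_congr_left
  intro t ht
  simp only [List.mem_range] at ht
  rw [if_pos (by omega)]

theorem dpA_eq_tableT (text_a text_b : String) :
    (lcs_length text_a text_b).2
      = (List.range (text_a.toList.length + 1)).map (rowT text_a.toList text_b.toList) := by
  unfold lcs_length
  simp only [PySem.List.pyRange_one, add_sub_cancel_right, Int.toNat_natCast]
  rw [← oT_zero text_a.toList text_b.toList,
    outerfold text_a.toList text_b.toList text_a.toList.length le_rfl,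
    oT_full]

theorem bt_emit (aL bL : List Char) (dp : List (List Int)) :
    ∀ (i j : Nat) (acc : List (String × Char)),
      ((lcsBtLoop aL bL dp i j acc).reverse.map pieceOf).flatten
        = emitAux aL bL dp i j ++ (acc.reverse.map pieceOf).flatten := by
  intro i j acc
  induction i, j, acc using lcsBtLoop.induct aL bL dp with
  | case1 i j acc h h1 ih =>
    rw [lcsBtLoop, dif_pos h, dif_pos h1, ih]
    conv_rhs => rw [emitAux]
    rw [dif_pos h1]
    simp [pieceOf]
  | case2 i j acc h h1 h2 ih =>
    rw [lcsBtLoop, dif_pos h, dif_neg h1, dif_pos h2, ih]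
    conv_rhs => rw [emitAux]
    rw [dif_neg h1, dif_pos h2]
    simp [pieceOf]
  | case3 i j acc h h1 h2 ih =>
    have hi : 0 < i := by
      rcases Nat.eq_zero_or_pos i with hi | hi
      · exact absurd ⟨by omega, Or.inl hi⟩ h2
      · exact hi
    rw [lcsBtLoop, dif_pos h, dif_neg h1, dif_neg h2, ih]
    conv_rhs => rw [emitAux]
    rw [dif_neg h1, dif_neg h2, if_pos hi]
    simp [pieceOf]
  | case4 i j acc h =>
    have hi : i = 0 := by omega
    have hj : j = 0 := by omega
    subst hi; subst hj
    rw [lcsBtLoop, emitAux]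
    simp

lemma joinNil (l : List (List Char)) : PySem.Chars.join [] l = l.flatten := by
  induction l with
  | nil => simp [PySem.Chars.join_nil]
  | cons p rest ih =>
    cases rest with
    | nil => simp [PySem.Chars.join_singleton]
    | cons q r =>
      rw [PySem.Chars.join_cons_cons]
      rw [ih]
      simp

-- ===== VERDICT (by name: the statement is the Claim_ definition above) =====
theorem one_direction_diff_spec : Claim_equal_one_direction_diff := by
  intro a b _
  unfold Spec_one_direction_diff one_direction_diff one_direction_diff_alt lcs_diff
  simp only [PySem.List.foldl_append_singleton_eq_map, List.nil_append]
  rw [show (fun (t : String × Char) => if t.1 = "equal" then [' ', t.2]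
      else if t.1 = "delete" then ['-', t.2] else ['+', t.2]) = pieceOf from rfl]
  rw [joinNil, dpA_eq_tableT, ← altRows_eq_tableT, bt_emit]
  simp
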